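-- pv_equiv track=rewrite | github.com/T4006/PasswordAnalyzer | PasswordAnalyzer.py | recommend_strength
-- ===== SOURCE A (Python) =====
-- def recommend_strength(password):
--     recommendations = []
--
--     # Check length
--     if len(password) < 8:
--         recommendations.append("Increase the length of the password")
--
--     # Check for complexity
--     if not any(char.isdigit() for char in password):
--         recommendations.append("Include numbers (e.g., 0-9)")
--     if not any(char.isalpha() for char in password):
--         recommendations.append("Include letters (e.g., a-z)")
--     if not any(char.isupper() for char in password):
--         recommendations.append("Include uppercase letters (e.g., A-Z)")
--     if not any(char.islower() for char in password):
--         recommendations.append("Include lowercase letters (e.g., a-z)")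
--     if not any(char in "!@#$%^&*()-_+=<>,.?/:;{}[]|~" for char in password):
--         recommendations.append("Include special characters (e.g., !@#$%^&*)")
--
--     return recommendations
-- ===== SOURCE B (Python) =====
-- def recommend_strength(password):
--     has_digit = has_alpha = has_upper = has_lower = has_special = False
--     for char in password:
--         if char.isdigit():
--             has_digit = True
--         if char.isalpha():
--             has_alpha = True
--         if char.isupper():
--             has_upper = True
--         if char.islower():
--             has_lower = True
--         if char in "!@#$%^&*()-_+=<>,.?/:;{}[]|~":
--             has_special = True
--     recommendations = []
--     if len(password) < 8:
--         recommendations.append("Increase the length of the password")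
--     if not has_digit:
--         recommendations.append("Include numbers (e.g., 0-9)")
--     if not has_alpha:
--         recommendations.append("Include letters (e.g., a-z)")
--     if not has_upper:
--         recommendations.append("Include uppercase letters (e.g., A-Z)")
--     if not has_lower:
--         recommendations.append("Include lowercase letters (e.g., a-z)")
--     if not has_special:
--         recommendations.append("Include special characters (e.g., !@#$%^&*)")
--     return recommendations
-- ===== Notes on version B (the rewrite author's own statement) =====
-- stated objective: simpler
-- what changed: Replaces five separate any(...) generator scans of the password with a single pass that maintains five boolean flags, then emits the same messages in the same order from the flags.
import Mathlib
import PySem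

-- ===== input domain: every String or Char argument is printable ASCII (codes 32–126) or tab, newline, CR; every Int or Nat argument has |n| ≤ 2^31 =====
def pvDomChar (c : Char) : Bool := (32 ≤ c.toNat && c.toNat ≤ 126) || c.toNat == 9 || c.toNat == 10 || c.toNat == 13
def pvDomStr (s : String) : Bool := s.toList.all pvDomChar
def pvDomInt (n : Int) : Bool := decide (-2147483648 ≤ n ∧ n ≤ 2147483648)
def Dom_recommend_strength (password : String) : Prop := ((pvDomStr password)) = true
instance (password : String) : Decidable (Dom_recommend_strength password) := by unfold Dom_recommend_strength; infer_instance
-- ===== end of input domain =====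

-- B replaces A's five separate any(...) scans with a single pass maintaining five boolean flags (objective: simpler).


-- ===== PORT A =====
def pvSpecials : List Char := "!@#$%^&*()-_+=<>,.?/:;{}[]|~".toList

-- Literal port of A: five any(...) scans over the password, each appending its message.
def recommend_strength (password : String) : List String :=
  let cs := password.toList
  (if cs.length < 8 then ["Increase the length of the password"] else []) ++
  (if cs.any PySem.Chars.isdigit then [] else ["Include numbers (e.g., 0-9)"]) ++
  (if cs.any PySem.Chars.isalpha then [] else ["Include letters (e.g., a-z)"]) ++
  (if cs.any PySem.Chars.isupper then [] else ["Include uppercase letters (e.g., A-Z)"]) ++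
  (if cs.any PySem.Chars.islower then [] else ["Include lowercase letters (e.g., a-z)"]) ++
  (if cs.any (fun c => pvSpecials.contains c) then [] else ["Include special characters (e.g., !@#$%^&*)"])


-- ===== PORT B =====
-- Port of B: one fold over the password maintaining five boolean flags, then emit from flags.
def pvFlagsStep (st : Bool × Bool × Bool × Bool × Bool) (c : Char) : Bool × Bool × Bool × Bool × Bool :=
  (st.1 || PySem.Chars.isdigit c,
   st.2.1 || PySem.Chars.isalpha c,
   st.2.2.1 || PySem.Chars.isupper c,
   st.2.2.2.1 || PySem.Chars.islower c,
   st.2.2.2.2 || pvSpecials.contains c)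

def recommend_strength_alt (password : String) : List String :=
  let st := password.toList.foldl pvFlagsStep (false, false, false, false, false)
  (if password.toList.length < 8 then ["Increase the length of the password"] else []) ++
  (if st.1 then [] else ["Include numbers (e.g., 0-9)"]) ++
  (if st.2.1 then [] else ["Include letters (e.g., a-z)"]) ++
  (if st.2.2.1 then [] else ["Include uppercase letters (e.g., A-Z)"]) ++
  (if st.2.2.2.1 then [] else ["Include lowercase letters (e.g., a-z)"]) ++
  (if st.2.2.2.2 then [] else ["Include special characters (e.g., !@#$%^&*)"])


-- ===== PRECONDITION & SPEC =====
def Spec_recommend_strength (password : String) (out : List String) : Prop := out = recommend_strength_alt password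
instance (password : String) (out : List String) : Decidable (Spec_recommend_strength password out) := by unfold Spec_recommend_strength; infer_instance

-- ===== CLAIM (what is proved, stated in full; the proofs are below) =====
def Claim_equal_recommend_strength : Prop := ∀ (password : String), Dom_recommend_strength password → Spec_recommend_strength password (recommend_strength password)

-- ===== LEMMAS AND PROOFS =====

-- ===== VERDICT (by name: the statement is the Claim_ definition above) =====
lemma pvFlags_eq (cs : List Char) (d a u l sp : Bool) :
    cs.foldl pvFlagsStep (d, a, u, l, sp) =
      (d || cs.any PySem.Chars.isdigit,
       a || cs.any PySem.Chars.isalpha,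
       u || cs.any PySem.Chars.isupper,
       l || cs.any PySem.Chars.islower,
       sp || cs.any (fun c => pvSpecials.contains c)) := by
  induction cs generalizing d a u l sp with
  | nil => simp
  | cons c cs ih =>
    simp only [List.foldl_cons, List.any_cons, pvFlagsStep, ih]
    simp [Bool.or_assoc]

theorem recommend_strength_spec : Claim_equal_recommend_strength := by
  intro password _
  unfold Spec_recommend_strength recommend_strength recommend_strength_alt
  simp [pvFlags_eq]
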